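-- pv_equiv track=rewrite | github.com/EtayKandil/dcs-final-project | pc_side/main.py | txtToHex
-- ===== SOURCE A (Python) =====
-- def decTohex(str):
--     temp = int(str)
--     if temp > 15:
--         return hex(temp)[2:]
--     else:
--         return "0" + hex(temp)[2:]
--
-- def txtToHex(txt):
--     toReturn = ""
--     lines = txt.split('\n')
--     words_by_line = [line.split(' ') for line in lines]
--
--     for line in words_by_line:
--         if len(line) == 1:
--             if line[0] == "clear_lcd":
--                 toReturn += "05"
--             elif line[0] == "sleep":
--                 toReturn += "08"
--         elif len(line) == 2:
--             if line[0] == "inc_lcd":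
--                 toReturn += "01"
--             elif line[0] == "dec_lcd":
--                 toReturn += "02"
--             elif line[0] == "set_delay":
--                 toReturn += "04"
--             elif line[0] == "servo_deg":
--                 toReturn += "06"
--             if line[0] == "servo_scan":
--                 toReturn += "07"
--                 nums = line[1].split(',')
--                 toReturn += decTohex(nums[0])
--                 toReturn += decTohex(nums[1])
--             else:
--                 if line[0] == "rra_lcd":
--                     toReturn += "03"
--                     toReturn += line[1]
--                 else:
--                     toReturn += decTohex(line[1])
--     return toReturn
-- ===== SOURCE B (Python) =====
-- def txtToHex(txt):
--     # Stage 1: compile each line into a stream of atoms: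
--     # ('lit', s) = literal opcode text, ('num', s) = decimal string to render
--     # as 2+-digit hex, ('raw', s) = argument copied verbatim.
--     ONE = {"clear_lcd": "05", "sleep": "08"}
--     TWO = {"inc_lcd": "01", "dec_lcd": "02", "set_delay": "04", "servo_deg": "06"}
--
--     def atoms(words):
--         if len(words) == 1:
--             op = ONE.get(words[0])
--             return [("lit", op)] if op else []
--         if len(words) == 2:
--             cmd, arg = words
--             if cmd == "servo_scan":
--                 ns = arg.split(",")
--                 return [("lit", "07"), ("num", ns[0]), ("num", ns[1])]
--             if cmd == "rra_lcd":
--                 return [("lit", "03"), ("raw", arg)]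
--             op = TWO.get(cmd)
--             return ([("lit", op)] if op else []) + [("num", arg)]
--         return []
--
--     # Stage 2: render the atom stream.
--     def render(atom):
--         kind, v = atom
--         if kind != "num":
--             return v
--         n = int(v)
--         h = hex(n)[2:]
--         return h if n > 15 else "0" + h
--
--     stream = [a for line in txt.split("\n") for a in atoms(line.split(" "))]
--     return "".join(render(a) for a in stream)
-- ===== Notes on version B (the rewrite author's own statement) =====
-- stated objective: alternative
-- what changed: B is a two-stage compiler: it first translates each line into an intermediate stream of typed atoms (literal opcode / numeric argument / raw argument) and then renders that stream to hex in a separate pass, instead of A's single nested branch cascade that appends directly to an output string.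
import Mathlib
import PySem

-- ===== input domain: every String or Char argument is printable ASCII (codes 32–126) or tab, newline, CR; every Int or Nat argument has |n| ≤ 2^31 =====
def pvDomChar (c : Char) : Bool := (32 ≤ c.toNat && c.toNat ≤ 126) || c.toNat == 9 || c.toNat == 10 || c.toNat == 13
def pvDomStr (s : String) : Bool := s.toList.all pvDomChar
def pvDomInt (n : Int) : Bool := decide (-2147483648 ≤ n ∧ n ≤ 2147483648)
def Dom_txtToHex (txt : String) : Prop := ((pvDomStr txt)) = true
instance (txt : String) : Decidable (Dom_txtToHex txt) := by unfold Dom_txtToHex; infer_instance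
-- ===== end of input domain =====

-- B is a two-stage compiler (lines → typed atom stream → rendered hex) replacing A's
-- single nested branch cascade that appends directly to the output string; alternative structure, same results.

-- ===== PORT A =====

-- hex(n)[2:], hand-ported: hex(n) = "0x…" for n ≥ 0 and "-0x…" for n < 0 (lowercase digits),
-- so [2:] drops "0x" resp. "-0"; exact for every int.
def pyHexTail (n : Int) : List Char :=
  if n < 0 then 'x' :: Nat.toDigits 16 n.natAbs else Nat.toDigits 16 n.toNat

def decTohexA (s : String) : List Char :=
  let temp : Int := (PySem.Int.ofStr? s).getD 0   -- int(s); none (ValueError) is excluded by Pre_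
  if temp > 15 then pyHexTail temp else '0' :: pyHexTail temp

-- the body of A's for-loop over one line (list of words), accumulating into toReturn
def lineHexA (acc : List Char) (line : List String) : List Char :=
  if PySem.List.len line = 1 then
    if PySem.List.pyGetD line 0 "" = "clear_lcd" then acc ++ ['0','5']
    else if PySem.List.pyGetD line 0 "" = "sleep" then acc ++ ['0','8']
    else acc
  else if PySem.List.len line = 2 then
    let acc1 :=
      if PySem.List.pyGetD line 0 "" = "inc_lcd" then acc ++ ['0','1']
      else if PySem.List.pyGetD line 0 "" = "dec_lcd" then acc ++ ['0','2']
      else if PySem.List.pyGetD line 0 "" = "set_delay" then acc ++ ['0','4']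
      else if PySem.List.pyGetD line 0 "" = "servo_deg" then acc ++ ['0','6']
      else acc
    if PySem.List.pyGetD line 0 "" = "servo_scan" then
      let nums := (PySem.Str.split? (PySem.List.pyGetD line 1 "") ",").getD []
      -- nums[1] raises IndexError when there is no comma; excluded by Pre_
      (acc1 ++ ['0','7']) ++ decTohexA (PySem.List.pyGetD nums 0 "") ++ decTohexA (PySem.List.pyGetD nums 1 "")
    else
      if PySem.List.pyGetD line 0 "" = "rra_lcd" then
        (acc1 ++ ['0','3']) ++ (PySem.List.pyGetD line 1 "").toList
      else acc1 ++ decTohexA (PySem.List.pyGetD line 1 "")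
  else acc

def txtToHex (txt : String) : String :=
  let lines := (PySem.Str.split? txt "\n").getD []
  let wordsByLine := lines.map (fun line => (PySem.Str.split? line " ").getD [])
  String.ofList (wordsByLine.foldl lineHexA [])

-- ===== PORT B =====

-- Source B's intermediate representation: ('lit', s) / ('num', s) / ('raw', s)
inductive Atom where
  | lit : List Char → Atom
  | num : String → Atom
  | raw : String → Atom
deriving DecidableEq, Repr

def oneOpsB : PySem.Dict String (List Char) :=
  (PySem.Dict.empty.insert "clear_lcd" ['0','5']).insert "sleep" ['0','8']

def twoOpsB : PySem.Dict String (List Char) :=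
  (((PySem.Dict.empty.insert "inc_lcd" ['0','1']).insert "dec_lcd" ['0','2']).insert
    "set_delay" ['0','4']).insert "servo_deg" ['0','6']

-- Source B's atoms(words): compile one line's word list into its atom stream
def atomsB (w : List String) : List Atom :=
  if PySem.List.len w = 1 then
    match oneOpsB.get? (PySem.List.pyGetD w 0 "") with
    | some op => [Atom.lit op]
    | none => []
  else if PySem.List.len w = 2 then
    let cmd := PySem.List.pyGetD w 0 ""
    let arg := PySem.List.pyGetD w 1 ""
    if cmd = "servo_scan" then
      let ns := (PySem.Str.split? arg ",").getD []
      -- ns[1] raises IndexError without a comma; excluded by Pre_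
      [Atom.lit ['0','7'], Atom.num (PySem.List.pyGetD ns 0 ""), Atom.num (PySem.List.pyGetD ns 1 "")]
    else if cmd = "rra_lcd" then [Atom.lit ['0','3'], Atom.raw arg]
    else
      (match twoOpsB.get? cmd with
       | some op => [Atom.lit op]
       | none => []) ++ [Atom.num arg]
  else []

-- Source B's render(atom)
def renderB : Atom → List Char
  | .lit v => v
  | .raw v => v.toList
  | .num v =>
    let n : Int := (PySem.Int.ofStr? v).getD 0   -- int(v); none (ValueError) is excluded by Pre_
    let h := if n < 0 then 'x' :: Nat.toDigits 16 n.natAbs else Nat.toDigits 16 n.toNat  -- hex(n)[2:]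
    if n > 15 then h else '0' :: h

def txtToHex_alt (txt : String) : String :=
  let stream := ((PySem.Str.split? txt "\n").getD []).flatMap
      (fun line => atomsB ((PySem.Str.split? line " ").getD []))
  String.ofList ((stream.map renderB).flatten)

-- ===== PRECONDITION & SPEC =====

-- Pre_ excludes exactly the inputs where Python A raises: a two-word line whose numeric argument fails
-- int() (ValueError), and servo_scan whose argument has no comma (IndexError on nums[1]).
def Pre_txtToHex (txt : String) : Prop :=
  ∀ w ∈ ((PySem.Str.split? txt "\n").getD []).map (fun line => (PySem.Str.split? line " ").getD []),
    w.length = 2 →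
      if PySem.List.pyGetD w 0 "" = "servo_scan" then
        let nums := (PySem.Str.split? (PySem.List.pyGetD w 1 "") ",").getD []
        2 ≤ nums.length ∧
        (PySem.Int.ofStr? (PySem.List.pyGetD nums 0 "")).isSome = true ∧
        (PySem.Int.ofStr? (PySem.List.pyGetD nums 1 "")).isSome = true
      else if PySem.List.pyGetD w 0 "" = "rra_lcd" then True
      else (PySem.Int.ofStr? (PySem.List.pyGetD w 1 "")).isSome = true

instance (txt : String) : Decidable (Pre_txtToHex txt) := by unfold Pre_txtToHex; infer_instance

def pvWitness_txtToHex : String := "inc_lcd 16\nservo_scan 3,200\nclear_lcd"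

def Spec_txtToHex (txt : String) (out : String) : Prop := out = txtToHex_alt txt
instance (txt : String) (out : String) : Decidable (Spec_txtToHex txt out) := by unfold Spec_txtToHex; infer_instance

-- ===== CLAIM (what is proved, stated in full; the proofs are below) =====
def Claim_equal_txtToHex : Prop := ∀ (txt : String), Dom_txtToHex txt → Pre_txtToHex txt → Spec_txtToHex txt (txtToHex txt)

-- ===== LEMMAS AND PROOFS =====

-- A's loop body only appends to its accumulator
theorem lineHexA_acc (acc : List Char) (w : List String) :
    lineHexA acc w = acc ++ lineHexA [] w := by
  simp only [lineHexA]
  split_ifs <;> simp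

-- per-line agreement: what A emits for one line is the rendering of B's atoms for it
theorem frag_eq (w : List String) : lineHexA [] w = ((atomsB w).map renderB).flatten := by
  match w with
  | [] => simp [lineHexA, atomsB, PySem.List.len]
  | [a] =>
    by_cases h1 : a = "clear_lcd" <;> by_cases h2 : a = "sleep" <;>
      simp [lineHexA, atomsB, renderB, oneOpsB, PySem.List.len, PySem.List.pyGetD,
        PySem.Dict.get?_insert, PySem.Dict.get?_empty, h1, h2]
  | a :: b :: c :: rest =>
    have hlen : ¬((rest.length : Int) + 1 + 1 + 1 = 1) ∧ ¬((rest.length : Int) + 1 + 1 + 1 = 2) := by omega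
    simp [lineHexA, atomsB, PySem.List.len, hlen.1, hlen.2]
  | [a, b] =>
    by_cases h1 : a = "inc_lcd" <;> by_cases h2 : a = "dec_lcd" <;>
    by_cases h3 : a = "set_delay" <;> by_cases h4 : a = "servo_deg" <;>
    by_cases h5 : a = "servo_scan" <;> by_cases h6 : a = "rra_lcd" <;>
      simp_all [lineHexA, atomsB, twoOpsB, PySem.List.len, PySem.List.pyGetD, PySem.Dict.get?_insert, PySem.Dict.get?_empty, renderB, decTohexA, pyHexTail]

theorem lists_eq (ls : List String) :
    ls.flatMap (fun l => lineHexA [] ((PySem.Str.split? l " ").getD []))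
      = (((ls.flatMap (fun l => atomsB ((PySem.Str.split? l " ").getD []))).map renderB).flatten) := by
  induction ls with
  | nil => simp
  | cons l t ih =>
    simp only [List.flatMap_cons, List.map_append, List.flatten_append]
    rw [frag_eq, ih]

-- ===== VERDICT (by name: the statement is the Claim_ definition above) =====
theorem txtToHex_spec : Claim_equal_txtToHex := by
  intro txt _ _
  show txtToHex txt = txtToHex_alt txt
  simp only [txtToHex, txtToHex_alt]
  rw [PySem.List.foldl_congr_mem _ _ (fun acc w => acc ++ lineHexA [] w) _
        (fun acc w _ => lineHexA_acc acc w),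
      PySem.List.foldl_append_eq_flatMap]
  simp only [List.flatMap_map, List.nil_append]
  rw [lists_eq]
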